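-- pv_equiv track=rewrite | github.com/stathamos/myLineup | Toolbox.py | count_element_list
-- ===== SOURCE A (Python) =====
-- def count_element_list(li):
--     """Count element in list"""
--     li2 = []
--     for i in li:
--         if li.count(i) > 1:
--             li2.append(str(li.count(i)) + ' - ' + i)
--         else:
--             li2.append(i)
--     res = []
--     for j in li2:
--         if j not in res:
--             res.append(j)
--             res.sort()
--     return res
-- ===== SOURCE B (Python) =====
-- def count_element_list(li):
--     """Count element in list"""
--     counts = {}
--     for x in li:
--         counts[x] = counts.get(x, 0) + 1
--     return sorted({str(c) + ' - ' + v if c > 1 else v for v, c in counts.items()})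
-- ===== Notes on version B (the rewrite author's own statement) =====
-- stated objective: faster
-- what changed: Replaces the per-element li.count scans and the repeated membership-test-plus-resort dedup loop by one counting pass into a dict, a single annotation pass over its items into a set, and one final sort.
import Mathlib
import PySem

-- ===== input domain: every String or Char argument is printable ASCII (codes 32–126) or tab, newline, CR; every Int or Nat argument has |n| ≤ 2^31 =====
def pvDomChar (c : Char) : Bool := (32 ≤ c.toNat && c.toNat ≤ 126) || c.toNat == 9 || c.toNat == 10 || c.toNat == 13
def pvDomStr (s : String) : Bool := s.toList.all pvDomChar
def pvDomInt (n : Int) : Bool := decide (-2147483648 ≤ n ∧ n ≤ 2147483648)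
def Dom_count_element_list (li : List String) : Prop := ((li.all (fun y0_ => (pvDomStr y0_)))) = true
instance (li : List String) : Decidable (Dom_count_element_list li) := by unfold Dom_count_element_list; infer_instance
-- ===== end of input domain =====

-- B replaces A's quadratic count/dedup-resort loops by one dict counting pass, a set of annotations, and one sort (faster).

-- ===== PORT A =====
def count_element_list (li : List String) : List String :=
  let li2 := li.foldl (fun acc i =>
    acc ++ [if (PySem.List.count li i : Int) > 1
            then PySem.Int.toStr (PySem.List.count li i : Int) ++ " - " ++ i
            else i]) []
  li2.foldl (fun res j =>
    if j ∈ res then res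
    else PySem.List.sorted (res ++ [j]) (fun x => x) false) []

-- ===== PORT B =====
def count_element_list_alt (li : List String) : List String :=
  let counts : PySem.Dict String Int :=
    li.foldl (fun d x => d.insert x (d.getD x 0 + 1)) PySem.Dict.empty
  PySem.List.sorted
    (PySem.Set.ofList (counts.items.map (fun p =>
      if p.2 > 1 then PySem.Int.toStr p.2 ++ " - " ++ p.1 else p.1)))
    (fun x => x) false

-- ===== PRECONDITION & SPEC =====
def Spec_count_element_list (li : List String) (out : List String) : Prop := out = count_element_list_alt li
instance (li : List String) (out : List String) : Decidable (Spec_count_element_list li out) := by unfold Spec_count_element_list; infer_instance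

-- ===== CLAIM (what is proved, stated in full; the proofs are below) =====
def Claim_equal_count_element_list : Prop := ∀ (li : List String), Dom_count_element_list li → Spec_count_element_list li (count_element_list li)

-- ===== LEMMAS AND PROOFS =====

-- the common annotation of a value v with respect to the original list li
def pvAnnot (li : List String) (v : String) : String :=
  if (PySem.List.count li v : Int) > 1
  then PySem.Int.toStr (PySem.List.count li v : Int) ++ " - " ++ v
  else v

-- A's dedup loop: the accumulator stays strictly sorted and collects exactly res ∪ l.
theorem pvFoldA_inv (l res : List String) (h : res.Pairwise (· < ·)) :
    (l.foldl (fun res j => if j ∈ res then res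
        else PySem.List.sorted (res ++ [j]) (fun x => x) false) res).Pairwise (· < ·) ∧
    ∀ x, x ∈ (l.foldl (fun res j => if j ∈ res then res
        else PySem.List.sorted (res ++ [j]) (fun x => x) false) res) ↔ x ∈ res ∨ x ∈ l := by
  induction l generalizing res with
  | nil => simpa using h
  | cons j t ih =>
    simp only [List.foldl_cons]
    by_cases hj : j ∈ res
    · rcases ih res h with ⟨-, -⟩
      simp only [if_pos hj]
      rcases ih res h with ⟨h1, h2⟩
      refine ⟨h1, fun x => ?_⟩
      rw [h2]
      constructor
      · rintro (hx | hx) <;> simp_all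
      · rintro (hx | hx)
        · exact Or.inl hx
        · rcases List.mem_cons.1 hx with rfl | hx
          · exact Or.inl hj
          · exact Or.inr hx
    · simp only [if_neg hj]
      have hnd : (res ++ [j]).Nodup := by
        refine List.Nodup.append (h.imp ne_of_lt) (List.nodup_singleton j) ?_
        intro a ha hb
        exact hj ((List.mem_singleton.1 hb) ▸ ha)
      have hnds : (PySem.List.sorted (res ++ [j]) (fun x => x) false).Nodup :=
        (PySem.List.sorted_perm (res ++ [j]) (fun x => x) false).nodup_iff.2 hnd
      have hle := PySem.List.sorted_pairwise (res ++ [j]) (fun x => x)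
      have hlt : (PySem.List.sorted (res ++ [j]) (fun x => x) false).Pairwise (· < ·) :=
        (hle.and hnds).imp (fun hab => lt_of_le_of_ne hab.1 hab.2)
      rcases ih _ hlt with ⟨h1, h2⟩
      refine ⟨h1, fun x => ?_⟩
      rw [h2]
      simp [PySem.List.mem_sorted, List.mem_append]
      tauto

-- ===== VERDICT (by name: the statement is the Claim_ definition above) =====
theorem count_element_list_spec : Claim_equal_count_element_list := by
  intro li _
  unfold Spec_count_element_list count_element_list count_element_list_alt
  -- B side: rewrite the counting loop to counter, items to the dedup map;
  -- A side: li2 is a map of the annotation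
  simp only [PySem.Dict.foldl_insert_getD_add_one_eq_counter, PySem.Dict.items_counter,
    PySem.List.foldl_append_singleton_eq_map, List.nil_append]
  have hBmap : ((PySem.Set.ofList li).map (fun k => (k, (List.count k li : Int)))).map
      (fun p => if p.2 > 1 then PySem.Int.toStr p.2 ++ " - " ++ p.1 else p.1)
      = (PySem.Set.ofList li).map (pvAnnot li) := by
    simp [List.map_map, Function.comp, pvAnnot, PySem.List.count_eq]
  rw [hBmap]
  set B := PySem.List.sorted (PySem.Set.ofList ((PySem.Set.ofList li).map (pvAnnot li)))
      (fun x => x) false with hB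
  have hBlt : B.Pairwise (· < ·) := PySem.List.sorted_ofList_pairwise_lt _
  have hBmem : ∀ x, x ∈ B ↔ x ∈ li.map (pvAnnot li) := by
    intro x
    rw [hB, PySem.List.mem_sorted, PySem.Set.mem_ofList]
    constructor
    · intro hx
      rcases List.mem_map.1 hx with ⟨v, hv, rfl⟩
      exact List.mem_map.2 ⟨v, (PySem.Set.mem_ofList li v).1 hv, rfl⟩
    · intro hx
      rcases List.mem_map.1 hx with ⟨v, hv, rfl⟩
      exact List.mem_map.2 ⟨v, (PySem.Set.mem_ofList li v).2 hv, rfl⟩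
  have hA := pvFoldA_inv (li.map (fun i =>
      if (PySem.List.count li i : Int) > 1
      then PySem.Int.toStr (PySem.List.count li i : Int) ++ " - " ++ i
      else i)) [] List.Pairwise.nil
  rcases hA with ⟨hAlt, hAmem⟩
  have hmapeq : (li.map (fun i =>
      if (PySem.List.count li i : Int) > 1
      then PySem.Int.toStr (PySem.List.count li i : Int) ++ " - " ++ i
      else i)) = li.map (pvAnnot li) := by
    simp [pvAnnot]
  rw [hmapeq] at hAlt hAmem ⊢
  set A := (li.map (pvAnnot li)).foldl (fun res j => if j ∈ res then res
      else PySem.List.sorted (res ++ [j]) (fun x => x) false) [] with hAdef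
  have hperm : A.Perm B := by
    have hAnd : A.Nodup := hAlt.imp ne_of_lt
    have hBnd : B.Nodup := hBlt.imp ne_of_lt
    rw [List.perm_ext_iff_of_nodup hAnd hBnd]
    intro x
    rw [hAmem x, hBmem x]
    simp
  exact hperm.eq_of_pairwise (fun a b _ _ h1 h2 => absurd h2 (not_lt.2 h1.le)) hAlt hBlt
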